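-- pv_equiv track=rewrite | github.com/dece/AdventOfCode | 2021/day12.py | skip2
-- ===== SOURCE A (Python) =====
-- from string import ascii_lowercase
--
-- def skip1(cave, path):
--     return cave[0] in ascii_lowercase and cave in path
--
-- def skip2(cave, path):
--     return (
--         skip1(cave, path)
--         and any(
--             path.count(c) > 1
--             for c in filter(lambda c: c[0] in ascii_lowercase, path)
--         )
--     )
-- ===== SOURCE B (Python) =====
-- from string import ascii_lowercase
--
-- def skip2(cave, path):
--     if not (cave[0] in ascii_lowercase and cave in path):
--         return False
--     smalls = [c for c in path if c[0] in ascii_lowercase]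
--     return len(smalls) != len(set(smalls))
-- ===== Notes on version B (the rewrite author's own statement) =====
-- stated objective: alternative
-- what changed: Replaces the any(path.count(c) > 1 ...) repeated-counting scan with building the list of small caves once and comparing its length against the size of its set (duplicate detection by cardinality).
-- outside the precondition, e.g. on skip2('a', ['a', 'a', '']): A returns True, B raises IndexError
import Mathlib
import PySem

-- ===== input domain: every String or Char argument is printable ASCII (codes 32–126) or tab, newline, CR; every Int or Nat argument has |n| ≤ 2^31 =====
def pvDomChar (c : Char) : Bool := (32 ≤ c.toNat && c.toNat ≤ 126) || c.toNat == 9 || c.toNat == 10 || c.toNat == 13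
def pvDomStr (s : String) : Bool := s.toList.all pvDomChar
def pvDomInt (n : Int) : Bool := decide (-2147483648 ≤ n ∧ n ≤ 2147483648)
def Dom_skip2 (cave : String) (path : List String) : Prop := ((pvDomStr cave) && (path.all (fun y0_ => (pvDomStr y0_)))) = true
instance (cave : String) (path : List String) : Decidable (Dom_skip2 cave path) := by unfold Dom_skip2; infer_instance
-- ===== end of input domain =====

-- B replaces the any(path.count(c) > 1 …) repeated-counting scan with one pass building the
-- small-cave list and a set-cardinality comparison (alternative decomposition, not claimed faster).

-- ===== PORT A =====
-- `c[0] in ascii_lowercase`: on a one-char string this is exactly 'a' ≤ c ≤ 'z' (exact on ASCII);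
-- an empty string raises IndexError in Python (pyGet? = none), excluded by Pre_skip2 (`false` branch unreachable there).
def pvFirstLower (s : String) : Bool :=
  match PySem.Str.pyGet? s 0 with
  | none => false
  | some c => decide ('a' ≤ c) && decide (c ≤ 'z')

def skip1 (cave : String) (path : List String) : Bool :=
  pvFirstLower cave && path.contains cave

def skip2 (cave : String) (path : List String) : Bool :=
  skip1 cave path &&
    (path.filter (fun c => pvFirstLower c)).any (fun c => decide (1 < PySem.List.count path c))

-- ===== PORT B =====
def skip2_alt (cave : String) (path : List String) : Bool :=
  if !(pvFirstLower cave && path.contains cave) then false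
  else
    let smalls := path.filter (fun c => pvFirstLower c)
    decide (smalls.length ≠ (PySem.Set.ofList smalls).length)

-- ===== PRECONDITION & SPEC =====
-- Pre_ excludes an empty cave (cave[0] raises IndexError) and, when the skip1 guard holds
-- (cave starts lowercase and is in path), paths containing an empty string: there c[0] raises
-- IndexError in A or in B depending on lazy vs eager evaluation of the small-cave scan.
def Pre_skip2 (cave : String) (path : List String) : Prop :=
  cave ≠ "" ∧
    (('a' ≤ cave.toList.headD 'A' ∧ cave.toList.headD 'A' ≤ 'z' ∧ cave ∈ path) →
      ∀ s ∈ path, s ≠ "")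
instance (cave : String) (path : List String) : Decidable (Pre_skip2 cave path) := by
  unfold Pre_skip2; infer_instance

def pvWitness_skip2 : String × List String := ("ab", ["ab", "ab", "CD"])

def Spec_skip2 (cave : String) (path : List String) (out : Bool) : Prop := out = skip2_alt cave path
instance (cave : String) (path : List String) (out : Bool) : Decidable (Spec_skip2 cave path out) := by
  unfold Spec_skip2; infer_instance

-- ===== CLAIM (what is proved, stated in full; the proofs are below) =====
def Claim_equal_skip2 : Prop := ∀ (cave : String) (path : List String), Dom_skip2 cave path → Pre_skip2 cave path → Spec_skip2 cave path (skip2 cave path)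

-- ===== LEMMAS AND PROOFS =====

-- PySem.Set.ofList is a sublist of its argument (first occurrences kept in order).
theorem ofList_sublist {α : Type} [BEq α] [LawfulBEq α] (l : List α) :
    (PySem.Set.ofList l).Sublist l := by
  induction l with
  | nil => simp [PySem.Set.ofList_nil]
  | cons x xs ih =>
    rw [PySem.Set.ofList_cons]
    refine List.Sublist.cons₂ x ?_
    exact List.filter_sublist.trans ih

-- A list has no duplicates iff deduplication preserves its length.
theorem nodup_iff_ofList_length {α : Type} [BEq α] [LawfulBEq α] (l : List α) :
    l.Nodup ↔ (PySem.Set.ofList l).length = l.length := by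
  constructor
  · intro h; rw [PySem.Set.ofList_eq_self_of_nodup l h]
  · intro h
    have := (ofList_sublist l).eq_of_length h
    rw [← this]; exact PySem.Set.nodup_ofList l

theorem skip2_spec_aux (path : List String) :
    ((path.filter (fun c => pvFirstLower c)).any (fun c => decide (1 < PySem.List.count path c)))
      = decide ((path.filter (fun c => pvFirstLower c)).length
          ≠ (PySem.Set.ofList (path.filter (fun c => pvFirstLower c))).length) := by
  set s := path.filter (fun c => pvFirstLower c) with hs
  have hcount : ∀ c ∈ s, List.count c s = List.count c path := by
    intro c hc
    rw [hs, List.count_filter]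
    simp [List.of_mem_filter (hs ▸ hc)]
  have hle : (PySem.Set.ofList s).length ≤ s.length := PySem.Set.length_ofList_le s
  cases h : (s.any (fun c => decide (1 < PySem.List.count path c))) with
  | false =>
    have hnd : s.Nodup := by
      rw [List.nodup_iff_count_le_one]
      intro a
      by_cases ha : a ∈ s
      · have := List.any_eq_false.mp h a ha
        simp only [PySem.List.count_eq, decide_eq_true_eq] at this
        rw [hcount a ha]; omega
      · simp [List.count_eq_zero_of_not_mem ha]
    rw [nodup_iff_ofList_length] at hnd
    simp [hnd]
  | true =>
    obtain ⟨c, hc, hgt⟩ := List.any_eq_true.mp h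
    simp only [PySem.List.count_eq, decide_eq_true_eq] at hgt
    have hnd : ¬ s.Nodup := by
      rw [List.nodup_iff_count_le_one]
      intro hall
      have := hall c
      rw [hcount c hc] at this
      omega
    rw [nodup_iff_ofList_length] at hnd
    exact (decide_eq_true (by omega : s.length ≠ (PySem.Set.ofList s).length)).symm

-- ===== VERDICT (by name: the statement is the Claim_ definition above) =====
theorem skip2_spec : Claim_equal_skip2 := by
  intro cave path _ _
  unfold Spec_skip2 skip2 skip2_alt skip1
  cases hb : (pvFirstLower cave && path.contains cave) with
  | false => simp
  | true =>
    simp only [Bool.true_and, Bool.not_true, Bool.false_eq_true, if_false]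
    exact skip2_spec_aux path
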